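-- pv_equiv track=rewrite | github.com/Jayn3345/BrawlBot | BrawlBot.py | showroster
-- ===== SOURCE A (Python) =====
-- def showroster(inputlist, fullroster):
--     rostersize = len(inputlist)
--     displayRoster = f"Remaining Roster ({rostersize}):\n\n"
--     newLineCounter = 0
--     for character in fullroster:
--         if character in inputlist:
--             displayRoster += f"{character}ㅤ"
--         else:
--             displayRoster += f"<:blank:876316169995431958>ㅤ"
--             # <:blank:876316169995431958>
--         newLineCounter += 1
--         if newLineCounter == 10:
--             displayRoster += "\n\n"
--             newLineCounter = 0
--     displayRoster += "\nㅤ"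
--     return displayRoster
-- ===== SOURCE B (Python) =====
-- def showroster(inputlist, fullroster):
--     tokens = [(c + "\u3164") if c in inputlist else "<:blank:876316169995431958>\u3164"
--               for c in fullroster]
--     body = ""
--     for i in range(0, len(tokens), 10):
--         chunk = tokens[i:i + 10]
--         body += "".join(chunk)
--         if len(chunk) == 10:
--             body += "\n\n"
--     return f"Remaining Roster ({len(inputlist)}):\n\n" + body + "\n\u3164"
-- ===== Notes on version B (the rewrite author's own statement) =====
-- stated objective: simpler
-- what changed: A's single flat loop with a mutable newLineCounter is replaced by precomputing the per-character token list once and then emitting it in chunks of 10 (join each chunk, add the blank line only after a full chunk).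
import Mathlib
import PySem

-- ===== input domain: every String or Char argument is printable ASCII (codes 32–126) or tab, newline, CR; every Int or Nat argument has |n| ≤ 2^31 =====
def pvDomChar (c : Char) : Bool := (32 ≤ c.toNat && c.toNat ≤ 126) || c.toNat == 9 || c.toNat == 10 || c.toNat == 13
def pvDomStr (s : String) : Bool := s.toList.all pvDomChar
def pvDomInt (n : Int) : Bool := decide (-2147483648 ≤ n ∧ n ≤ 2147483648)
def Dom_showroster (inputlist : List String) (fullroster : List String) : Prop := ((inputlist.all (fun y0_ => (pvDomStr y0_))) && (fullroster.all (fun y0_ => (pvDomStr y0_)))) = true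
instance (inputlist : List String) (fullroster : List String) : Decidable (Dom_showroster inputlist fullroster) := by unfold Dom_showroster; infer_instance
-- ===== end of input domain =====

-- B replaces A's flat loop with its newline counter by a precompute-tokens-then-chunk-by-10 pass (objective: simpler decomposition, same cost).

-- ===== PORT A =====
def showroster (inputlist : List String) (fullroster : List String) : String :=
  let rostersize : Int := inputlist.length
  let displayRoster := "Remaining Roster (" ++ PySem.Int.toStr rostersize ++ "):\n\n"
  let st := fullroster.foldl (fun (st : String × Int) character =>
      let d := if inputlist.contains character
               then st.1 ++ character ++ "ㅤ"
               else st.1 ++ "<:blank:876316169995431958>ㅤ"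
      let c := st.2 + 1
      if c == 10 then (d ++ "\n\n", (0 : Int)) else (d, c)) (displayRoster, (0 : Int))
  st.1 ++ "\nㅤ"

-- ===== PORT B =====
-- the 'for i in range(0, len(tokens), 10)' loop of Source B: i = 0, 10, 20, … while i < len(tokens);
-- tokens[i:i+10] with 0 ≤ i is (tokens.drop i).take 10 (exact: PySem.List.slice_natCast_add),
-- and ''.join(chunk) is String.join chunk.
def chunkLoopB (tokens : List String) (body : String) (i : Nat) : String :=
  if _h : i < tokens.length then
    let chunk := (tokens.drop i).take 10
    let body1 := body ++ String.join chunk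
    let body2 := if chunk.length == 10 then body1 ++ "\n\n" else body1
    chunkLoopB tokens body2 (i + 10)
  else body
termination_by tokens.length - i
decreasing_by omega

def showroster_alt (inputlist : List String) (fullroster : List String) : String :=
  let tokens := fullroster.map (fun character =>
      if inputlist.contains character then character ++ "ㅤ"
      else "<:blank:876316169995431958>ㅤ")
  let body := chunkLoopB tokens "" 0
  "Remaining Roster (" ++ PySem.Int.toStr (inputlist.length : Int) ++ "):\n\n" ++ body ++ "\nㅤ"

-- ===== PRECONDITION & SPEC =====
def Spec_showroster (inputlist : List String) (fullroster : List String) (out : String) : Prop := out = showroster_alt inputlist fullroster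
instance (inputlist : List String) (fullroster : List String) (out : String) : Decidable (Spec_showroster inputlist fullroster out) := by unfold Spec_showroster; infer_instance

-- ===== CLAIM (what is proved, stated in full; the proofs are below) =====
def Claim_equal_showroster : Prop := ∀ (inputlist : List String) (fullroster : List String), Dom_showroster inputlist fullroster → Spec_showroster inputlist fullroster (showroster inputlist fullroster)

-- ===== LEMMAS AND PROOFS =====

-- M tokens c: the text emitted for the remaining tokens when c items are already on the current line.
def pvM : List String → Int → String
  | [], _ => ""
  | t :: ts, c => if c + 1 == 10 then t ++ ("\n\n" ++ pvM ts 0) else t ++ pvM ts (c + 1)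

theorem pv_foldl_append_str (l : List String) : ∀ (s : String),
    l.foldl (fun r t => r ++ t) s = s ++ l.foldl (fun r t => r ++ t) "" := by
  induction l with
  | nil => intro s; simp
  | cons x l ih =>
    intro s
    simp only [List.foldl_cons]
    rw [ih (s ++ x), ih ("" ++ x)]
    simp only [String.empty_append, String.append_assoc]

theorem pv_join_nil : String.join ([] : List String) = "" := rfl

theorem pv_join_cons (x : String) (l : List String) :
    String.join (x :: l) = x ++ String.join l := by
  simp only [String.join, List.foldl_cons]
  rw [pv_foldl_append_str]
  simp

theorem pvM_small : ∀ (ts : List String) (c : Int), 0 ≤ c → c + ts.length < 10 →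
    pvM ts c = String.join ts := by
  intro ts
  induction ts with
  | nil => intro c _ _; simp [pvM, pv_join_nil]
  | cons t ts ih =>
    intro c hc hlen
    simp only [List.length_cons] at hlen
    have h10 : ¬ (c + 1 == 10) = true := by
      simp only [beq_iff_eq]; omega
    simp only [pvM, h10, if_false, Bool.false_eq_true]
    rw [ih (c + 1) (by omega) (by omega), pv_join_cons]

theorem pvM_full : ∀ (a rest : List String) (c : Int), 0 ≤ c → c < 10 →
    c + a.length = 10 → pvM (a ++ rest) c = String.join a ++ ("\n\n" ++ pvM rest 0) := by
  intro a
  induction a with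
  | nil => intro rest c _ _ hlen; simp at hlen; omega
  | cons t a ih =>
    intro rest c hc hc10 hlen
    simp only [List.length_cons] at hlen
    by_cases h : c + 1 = 10
    · have ha : a = [] := by
        have : a.length = 0 := by push_cast at hlen; omega
        exact List.length_eq_zero_iff.mp this
      subst ha
      simp only [List.cons_append, List.nil_append, pvM, beq_iff_eq, h, if_true,
        pv_join_cons, pv_join_nil]
      simp only [String.append_empty]
    · have h10 : ¬ (c + 1 == 10) = true := by simp only [beq_iff_eq]; exact h
      simp only [List.cons_append, pvM, h10, if_false, Bool.false_eq_true]
      rw [ih rest (c + 1) (by omega) (by omega) (by push_cast at hlen ⊢; omega),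
        pv_join_cons, String.append_assoc]

theorem pvM_chunk (R : List String) :
    pvM R 0 = String.join (R.take 10) ++
      ((if (R.take 10).length == 10 then "\n\n" else "") ++ pvM (R.drop 10) 0) := by
  by_cases h : 10 ≤ R.length
  · have htake : (R.take 10).length = 10 := by simp [List.length_take]; omega
    conv_lhs => rw [← List.take_append_drop 10 R]
    rw [pvM_full (R.take 10) (R.drop 10) 0 (by omega) (by omega) (by rw [htake]; simp)]
    simp [htake]
  · have htake : R.take 10 = R := List.take_of_length_le (by omega)
    have hdrop : R.drop 10 = [] := List.drop_eq_nil_of_le (by omega)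
    have hlen : ¬ (R.length == 10) = true := by simp only [beq_iff_eq]; omega
    rw [htake, hdrop]
    simp only [hlen, if_false, Bool.false_eq_true, pvM]
    rw [pvM_small R 0 (by omega) (by omega)]
    simp

-- A's loop, from any accumulated string and counter, appends pvM of the remaining tokens.
theorem pvA_loop (inputlist : List String) : ∀ (ts : List String) (s : String) (c : Int),
    (ts.foldl (fun (st : String × Int) character =>
      let d := if inputlist.contains character
               then st.1 ++ character ++ "ㅤ"
               else st.1 ++ "<:blank:876316169995431958>ㅤ"
      let c := st.2 + 1
      if c == 10 then (d ++ "\n\n", (0 : Int)) else (d, c)) (s, c)).1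
    = s ++ pvM (ts.map (fun character =>
        if inputlist.contains character then character ++ "ㅤ"
        else "<:blank:876316169995431958>ㅤ")) c := by
  intro ts
  induction ts with
  | nil => intro s c; simp [pvM]
  | cons t ts ih =>
    intro s c
    simp only [List.foldl_cons, List.map_cons, pvM]
    by_cases h10 : (c + 1 == 10) = true
    · simp only [h10, if_true]
      by_cases hmem : inputlist.contains t
      · simp only [hmem, if_true, ih]
        simp only [String.append_assoc]
      · simp only [hmem, Bool.false_eq_true, if_false, ih]
        simp only [String.append_assoc]
    · simp only [h10, if_false, Bool.false_eq_true]
      by_cases hmem : inputlist.contains t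
      · simp only [hmem, if_true, ih]
        simp only [String.append_assoc]
      · simp only [hmem, Bool.false_eq_true, if_false, ih]
        simp only [String.append_assoc]

-- B's chunk loop, started at offset i, appends pvM of the tokens from i on.
theorem pvB_loop (tokens : List String) : ∀ (k : Nat) (body : String) (i : Nat),
    tokens.length - i ≤ k →
    chunkLoopB tokens body i = body ++ pvM (tokens.drop i) 0 := by
  intro k
  induction k with
  | zero =>
    intro body i hk
    rw [chunkLoopB, dif_neg (by omega)]
    rw [List.drop_eq_nil_of_le (by omega)]
    simp [pvM]
  | succ k ih =>
    intro body i hk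
    by_cases h : i < tokens.length
    · rw [chunkLoopB, dif_pos h]
      simp only
      rw [ih _ (i + 10) (by omega)]
      rw [show tokens.drop (i + 10) = (tokens.drop i).drop 10 by
        rw [List.drop_drop]]
      rw [pvM_chunk (tokens.drop i)]
      by_cases hlen : (((tokens.drop i).take 10).length == 10) = true
      · simp only [hlen, if_true]
        simp [String.append_assoc]
      · simp only [hlen, if_false, Bool.false_eq_true]
        simp [String.append_assoc]
    · rw [chunkLoopB, dif_neg h]
      rw [List.drop_eq_nil_of_le (by omega)]
      simp [pvM]

-- ===== VERDICT (by name: the statement is the Claim_ definition above) =====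
theorem showroster_spec : Claim_equal_showroster := by
  intro inputlist fullroster _
  unfold Spec_showroster showroster showroster_alt
  simp only
  rw [pvA_loop, pvB_loop (fullroster.map fun character =>
      if inputlist.contains character then character ++ "ㅤ"
      else "<:blank:876316169995431958>ㅤ") fullroster.length "" 0 (by simp)]
  simp only [List.drop_zero, String.empty_append, String.append_assoc]
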